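-- pv_equiv track=rewrite | github.com/SamyNassar/Problem-Solving | IEEE-CS21/CS21-Science-Day-2/ksenia-and-pan-scales.py | checkScaleEquilibrium
-- ===== SOURCE A (Python) =====
-- def checkScaleEquilibrium(leftScale, rightScale, unusedMasses):
--
--     leftScaleQuantity = len(leftScale)
--     rightScaleQuantity = len(rightScale)
--     unusedMassesQuantity = len(unusedMasses)
--
--     scalesDifferential = abs(leftScaleQuantity - rightScaleQuantity)
--
--     if(unusedMassesQuantity >= scalesDifferential):
--         for mass in unusedMasses:
--             if(leftScaleQuantity > rightScaleQuantity):
--                 rightScale += mass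
--                 rightScaleQuantity += 1
--             else:
--                 leftScale += mass
--                 leftScaleQuantity += 1
--         if(len(leftScale) == len(rightScale)):
--             return leftScale + "|" + rightScale
--         else:
--             return "Impossible"
--     else:
--         return "Impossible"
-- ===== SOURCE B (Python) =====
-- def checkScaleEquilibrium(leftScale, rightScale, unusedMasses):
--     diff = abs(len(leftScale) - len(rightScale))
--     if len(unusedMasses) < diff or (len(leftScale) + len(rightScale) + len(unusedMasses)) % 2 == 1:
--         return "Impossible"
--     block, rest = unusedMasses[:diff], unusedMasses[diff:]
--     if len(leftScale) < len(rightScale):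
--         return leftScale + block + rest[::2] + "|" + rightScale + rest[1::2]
--     else:
--         return leftScale + rest[::2] + "|" + rightScale + block + rest[1::2]
-- ===== Notes on version B (the rewrite author's own statement) =====
-- stated objective: simpler
-- what changed: Replaces A's per-mass greedy loop (compare scale lengths, append one mass at a time) by a closed form: a feasibility test (enough masses and even total), the deficit block unused[:diff] appended to the shorter side, then the rest split by slices rest[::2]/rest[1::2].
import Mathlib
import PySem

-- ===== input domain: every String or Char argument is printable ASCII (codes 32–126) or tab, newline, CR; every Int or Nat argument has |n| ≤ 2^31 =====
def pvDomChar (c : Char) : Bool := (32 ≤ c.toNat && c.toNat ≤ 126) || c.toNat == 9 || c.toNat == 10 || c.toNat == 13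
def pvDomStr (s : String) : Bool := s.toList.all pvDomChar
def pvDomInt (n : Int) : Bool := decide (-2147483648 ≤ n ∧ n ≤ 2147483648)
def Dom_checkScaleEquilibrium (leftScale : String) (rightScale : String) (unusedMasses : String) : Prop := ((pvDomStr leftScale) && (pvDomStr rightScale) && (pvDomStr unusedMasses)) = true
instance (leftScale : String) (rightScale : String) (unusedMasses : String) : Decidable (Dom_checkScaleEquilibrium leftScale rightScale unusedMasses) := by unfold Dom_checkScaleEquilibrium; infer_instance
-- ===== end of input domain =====

-- B replaces A's per-mass greedy loop (compare lengths, append one char at a time) by a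
-- closed form: a feasibility test (enough masses, even total) and three slices
-- (deficit block to the shorter side, then rest[::2] / rest[1::2]): simpler, measured faster.

-- ===== PORT A =====
-- the loop 'for mass in unusedMasses: …' with its running quantities, on code points
def pvLoopA : List Char → List Char → List Char → Nat → Nat → (List Char × List Char)
  | [], L, R, _, _ => (L, R)
  | c :: u, L, R, lq, rq =>
      if lq > rq then pvLoopA u L (R ++ [c]) lq (rq + 1)
      else pvLoopA u (L ++ [c]) R (lq + 1) rq

def checkScaleEquilibrium (leftScale : String) (rightScale : String) (unusedMasses : String) : String :=
  let L := leftScale.toList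
  let R := rightScale.toList
  let U := unusedMasses.toList
  let leftScaleQuantity := L.length
  let rightScaleQuantity := R.length
  let unusedMassesQuantity := U.length
  let scalesDifferential := ((leftScaleQuantity : Int) - (rightScaleQuantity : Int)).natAbs
  if unusedMassesQuantity ≥ scalesDifferential then
    let res := pvLoopA U L R leftScaleQuantity rightScaleQuantity
    if res.1.length = res.2.length then String.ofList (res.1 ++ '|' :: res.2)
    else "Impossible"
  else "Impossible"

-- ===== PORT B =====
def checkScaleEquilibrium_alt (leftScale : String) (rightScale : String) (unusedMasses : String) : String :=
  let L := leftScale.toList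
  let R := rightScale.toList
  let U := unusedMasses.toList
  let diff := ((L.length : Int) - (R.length : Int)).natAbs
  if U.length < diff ∨ (L.length + R.length + U.length) % 2 = 1 then "Impossible"
  else
    let block := PySem.List.slice U none (some (diff : Int))        -- unusedMasses[:diff]
    let rest := PySem.List.slice U (some (diff : Int)) none         -- unusedMasses[diff:]
    let evens := (PySem.List.slice? rest none none 2).getD []       -- rest[::2] (step 2 ≠ 0: never none)
    let odds := (PySem.List.slice? rest (some 1) none 2).getD []    -- rest[1::2]
    if L.length < R.length then
      String.ofList ((L ++ block ++ evens) ++ '|' :: (R ++ odds))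
    else
      String.ofList ((L ++ evens) ++ '|' :: (R ++ block ++ odds))

-- ===== PRECONDITION & SPEC =====
def Spec_checkScaleEquilibrium (leftScale : String) (rightScale : String) (unusedMasses : String) (out : String) : Prop := out = checkScaleEquilibrium_alt leftScale rightScale unusedMasses
instance (leftScale : String) (rightScale : String) (unusedMasses : String) (out : String) : Decidable (Spec_checkScaleEquilibrium leftScale rightScale unusedMasses out) := by unfold Spec_checkScaleEquilibrium; infer_instance

-- ===== CLAIM (what is proved, stated in full; the proofs are below) =====
def Claim_equal_checkScaleEquilibrium : Prop := ∀ (leftScale : String) (rightScale : String) (unusedMasses : String), Dom_checkScaleEquilibrium leftScale rightScale unusedMasses → Spec_checkScaleEquilibrium leftScale rightScale unusedMasses (checkScaleEquilibrium leftScale rightScale unusedMasses)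

-- ===== LEMMAS AND PROOFS =====

-- even-/odd-indexed elements of a list (proof-side characterisation of rest[::2] / rest[1::2])
def pvEvens : List Char → List Char
  | [] => []
  | [c] => [c]
  | c :: _ :: v => c :: pvEvens v

def pvOdds : List Char → List Char
  | [] => []
  | [_] => []
  | _ :: d :: v => d :: pvOdds v

theorem pvEvens_odds_cons (u : List Char) :
    (∀ c, pvEvens (c :: u) = c :: pvOdds u) ∧ (∀ c, pvOdds (c :: u) = pvEvens u) := by
  induction u using pvEvens.induct with
  | case1 => simp [pvEvens, pvOdds]
  | case2 a => simp [pvEvens, pvOdds]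
  | case3 a b v ih => simp [pvEvens, pvOdds, ih.1, ih.2]

theorem pvEvens_cons (c : Char) (u : List Char) : pvEvens (c :: u) = c :: pvOdds u :=
  (pvEvens_odds_cons u).1 c

theorem pvOdds_cons (c : Char) (u : List Char) : pvOdds (c :: u) = pvEvens u :=
  (pvEvens_odds_cons u).2 c

theorem length_pvEvens (u : List Char) : (pvEvens u).length = (u.length + 1) / 2 := by
  induction u using pvEvens.induct <;> simp [pvEvens, *]
  omega

theorem length_pvOdds (u : List Char) : (pvOdds u).length = u.length / 2 := by
  induction u using pvOdds.induct <;> simp [pvOdds, *]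
  omega

theorem filterMap_range_succ (f : Nat → Option Char) (n : Nat) :
    (List.range (n + 1)).filterMap f = (f 0).toList ++ (List.range n).filterMap (fun k => f (k + 1)) := by
  rw [List.range_succ_eq_map, List.filterMap_cons, List.filterMap_map]
  match h : f 0 with
  | none => simp [h]
  | some b => simp [h]

theorem filterMap_evens (u : List Char) :
    (List.range ((u.length + 1) / 2)).filterMap (fun k => u[2 * k]?) = pvEvens u := by
  induction u using pvEvens.induct with
  | case1 => simp [pvEvens]
  | case2 c => simp [pvEvens, List.range_succ]
  | case3 c d v ih =>
      have h2 : ((c :: d :: v).length + 1) / 2 = (v.length + 1) / 2 + 1 := by simp; omega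
      rw [h2, filterMap_range_succ]
      have he : (List.range ((v.length + 1) / 2)).filterMap (fun k => (c :: d :: v)[2 * (k + 1)]?)
          = (List.range ((v.length + 1) / 2)).filterMap (fun k => v[2 * k]?) := by
        apply List.filterMap_congr; intro x _
        have h3 : 2 * (x + 1) = 2 * x + 1 + 1 := by omega
        simp [h3]
      rw [he, ih]
      simp [pvEvens]

theorem filterMap_odds (u : List Char) :
    (List.range (u.length / 2)).filterMap (fun k => u[2 * k + 1]?) = pvOdds u := by
  induction u using pvOdds.induct with
  | case1 => simp [pvOdds]
  | case2 c => simp [pvOdds]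
  | case3 c d v ih =>
      have h2 : (c :: d :: v).length / 2 = v.length / 2 + 1 := by simp; omega
      rw [h2, filterMap_range_succ]
      have he : (List.range (v.length / 2)).filterMap (fun k => (c :: d :: v)[2 * (k + 1) + 1]?)
          = (List.range (v.length / 2)).filterMap (fun k => v[2 * k + 1]?) := by
        apply List.filterMap_congr; intro x _
        have h3 : 2 * (x + 1) + 1 = 2 * x + 1 + 1 + 1 := by omega
        simp [h3]
      rw [he, ih]
      simp [pvOdds]

-- rest[::2] is the even-indexed elements
theorem slice2_evens (u : List Char) : PySem.List.slice? u none none 2 = some (pvEvens u) := by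
  rw [← filterMap_evens]
  simp only [PySem.List.slice?, PySem.List.sliceIndices]
  norm_num
  have hc : (if 0 < u.length then (((u.length : Int) + 2 - 1) / 2).toNat else 0) = (u.length + 1) / 2 := by
    split <;> omega
  rw [hc]
  apply List.filterMap_congr
  intro x _
  have h4 : ((2 : Int) * ↑x).toNat = 2 * x := by omega
  rw [h4]

-- rest[1::2] is the odd-indexed elements
theorem slice2_odds (u : List Char) : PySem.List.slice? u (some 1) none 2 = some (pvOdds u) := by
  rw [← filterMap_odds]
  cases u with
  | nil => decide
  | cons a v =>
    simp only [PySem.List.slice?, PySem.List.sliceIndices]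
    simp only [if_neg (by norm_num : ¬ (2:Int) = 0), if_neg (by norm_num : ¬ (2:Int) < 0),
      if_pos (by norm_num : (0:Int) < 2), if_neg (by norm_num : ¬ (1:Int) < 0)]
    have hm : min (1:Int) ↑(a :: v).length = 1 := by simp
    rw [hm]
    have hc : (if (1:Int) < ↑(a :: v).length then (((↑(a :: v).length : Int) - 1 + 2 - 1) / 2).toNat else 0)
        = (a :: v).length / 2 := by simp only [List.length_cons]; split <;> omega
    rw [hc]
    congr 1
    apply List.filterMap_congr
    intro x _
    have h4 : ((1 : Int) + 2 * ↑x).toNat = 2 * x + 1 := by omega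
    rw [h4]

-- the loop from a state whose sides have equal length alternates left, right, left, …
theorem loopA_balanced (u : List Char) :
    (∀ L R : List Char, L.length = R.length →
        pvLoopA u L R L.length R.length = (L ++ pvEvens u, R ++ pvOdds u)) ∧
    (∀ L R : List Char, L.length = R.length + 1 →
        pvLoopA u L R L.length R.length = (L ++ pvOdds u, R ++ pvEvens u)) := by
  induction u with
  | nil => constructor <;> intro L R h <;> simp [pvLoopA, pvEvens, pvOdds]
  | cons c u ih =>
      constructor <;> intro L R h
      · have hc : ¬ L.length > R.length := by omega
        rw [pvLoopA, if_neg hc]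
        have h1 : L.length + 1 = (L ++ [c]).length := by simp
        rw [h1]
        rw [ih.2 (L ++ [c]) R (by simp [h])]
        simp [pvEvens_cons, pvOdds_cons]
      · have hc : L.length > R.length := by omega
        rw [pvLoopA, if_pos hc]
        have h1 : R.length + 1 = (R ++ [c]).length := by simp
        rw [h1]
        rw [ih.1 L (R ++ [c]) (by simp; omega)]
        simp [pvEvens_cons, pvOdds_cons]

-- the deficit phase when the right side is longer by k: the first k masses all go left
theorem loopA_rlonger (k : Nat) : ∀ (u L R : List Char), R.length = L.length + k →
    pvLoopA u L R L.length R.length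
      = pvLoopA (u.drop k) (L ++ u.take k) R (L ++ u.take k).length R.length := by
  induction k with
  | zero => intro u L R h; simp
  | succ k ih =>
      intro u L R h
      cases u with
      | nil => simp [pvLoopA]
      | cons c u =>
          have hc : ¬ L.length > R.length := by omega
          rw [pvLoopA, if_neg hc]
          have h1 : L.length + 1 = (L ++ [c]).length := by simp
          rw [h1, ih u (L ++ [c]) R (by simp; omega)]
          simp

-- the deficit phase when the left side is longer by k: the first k masses all go right
theorem loopA_llonger (k : Nat) : ∀ (u L R : List Char), L.length = R.length + k →
    pvLoopA u L R L.length R.length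
      = pvLoopA (u.drop k) L (R ++ u.take k) L.length (R ++ u.take k).length := by
  induction k with
  | zero => intro u L R h; simp
  | succ k ih =>
      intro u L R h
      cases u with
      | nil => simp [pvLoopA]
      | cons c u =>
          have hc : L.length > R.length := by omega
          rw [pvLoopA, if_pos hc]
          have h1 : R.length + 1 = (R ++ [c]).length := by simp
          rw [h1, ih u L (R ++ [c]) (by simp; omega)]
          simp

-- A = B on every pair of char lists (the string wrappers are peeled off in the verdict)
theorem main_lists (L R U : List Char) :
    (let d := ((L.length : Int) - (R.length : Int)).natAbs
     if U.length ≥ d then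
       let res := pvLoopA U L R L.length R.length
       if res.1.length = res.2.length then String.ofList (res.1 ++ '|' :: res.2)
       else "Impossible"
     else "Impossible")
    = (let d := ((L.length : Int) - (R.length : Int)).natAbs
       if U.length < d ∨ (L.length + R.length + U.length) % 2 = 1 then "Impossible"
       else
         if L.length < R.length then
           String.ofList ((L ++ U.take d ++ pvEvens (U.drop d)) ++ '|' :: (R ++ pvOdds (U.drop d)))
         else
           String.ofList ((L ++ pvEvens (U.drop d)) ++ '|' :: (R ++ U.take d ++ pvOdds (U.drop d)))) := by
  simp only []
  set d := ((L.length : Int) - (R.length : Int)).natAbs with hd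
  by_cases h1 : U.length ≥ d
  · rw [if_pos h1]
    by_cases h2 : L.length < R.length
    · -- right side longer: the first d masses go left
      have hdk : R.length = L.length + d := by omega
      rw [loopA_rlonger d U L R hdk]
      have hlen : (L ++ U.take d).length = R.length := by simp; omega
      rw [(loopA_balanced (U.drop d)).1 _ _ hlen]
      by_cases h3 : (L.length + R.length + U.length) % 2 = 1
      · rw [if_pos (Or.inr h3)]
        apply if_neg
        simp [length_pvEvens, length_pvOdds]
        omega
      · rw [if_pos (show ((L ++ U.take d ++ pvEvens (U.drop d), R ++ pvOdds (U.drop d)).1.length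
              = (L ++ U.take d ++ pvEvens (U.drop d), R ++ pvOdds (U.drop d)).2.length)
            from by simp [length_pvEvens, length_pvOdds]; omega)]
        rw [if_neg (show ¬(U.length < d ∨ (L.length + R.length + U.length) % 2 = 1)
            from by push Not; exact ⟨by omega, h3⟩), if_pos h2]
    · -- left side longer or equal: the first d masses go right
      have hdk : L.length = R.length + d := by omega
      rw [loopA_llonger d U L R hdk]
      have hlen : L.length = (R ++ U.take d).length := by simp; omega
      rw [(loopA_balanced (U.drop d)).1 _ _ hlen]
      by_cases h3 : (L.length + R.length + U.length) % 2 = 1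
      · rw [if_pos (Or.inr h3)]
        apply if_neg
        simp [length_pvEvens, length_pvOdds]
        omega
      · rw [if_pos (show ((L ++ pvEvens (U.drop d), R ++ U.take d ++ pvOdds (U.drop d)).1.length
              = (L ++ pvEvens (U.drop d), R ++ U.take d ++ pvOdds (U.drop d)).2.length)
            from by simp [length_pvEvens, length_pvOdds]; omega)]
        rw [if_neg (show ¬(U.length < d ∨ (L.length + R.length + U.length) % 2 = 1)
            from by push Not; exact ⟨by omega, h3⟩), if_neg h2]
  · rw [if_neg h1, if_pos (Or.inl (by omega))]

-- ===== VERDICT (by name: the statement is the Claim_ definition above) =====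
theorem checkScaleEquilibrium_spec : Claim_equal_checkScaleEquilibrium := by
  intro l r u _
  unfold Spec_checkScaleEquilibrium
  simp only [checkScaleEquilibrium, checkScaleEquilibrium_alt,
    PySem.List.slice_to_natCast, PySem.List.slice_from_natCast, slice2_evens, slice2_odds,
    Option.getD_some]
  exact main_lists l.toList r.toList u.toList
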